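-- pv_equiv track=rewrite | github.com/MX682X/PK5-UPDI-GDB-Server | pk_gdbserver.py | decode_hex_string
-- ===== SOURCE A (Python) =====
-- def decode_hex_string(data, endian = "little") -> int:
--     ret_val = 0
--
--     length = len(data)
--     n = 0
--     pos = 0
--     while (n < length):
--         num = int(data[n:n+2], 16) & 0xFF
--         n += 2
--         if (endian == "little"):
--             ret_val += num << (8*pos)
--         else:
--             ret_val = (ret_val << 8) + num
--
--         pos += 1
--
--     return ret_val
-- ===== SOURCE B (Python) =====
-- def decode_hex_string(data, endian = "little") -> int:
--     buf = bytearray()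
--     for i in range(0, len(data), 2):
--         buf.append(int(data[i:i+2], 16) & 0xFF)
--     return int.from_bytes(buf, "little" if endian == "little" else "big")
-- ===== Notes on version B (the rewrite author's own statement) =====
-- stated objective: idiomatic
-- what changed: Replaces the manual bit-shift accumulation with a per-iteration endian branch by building a bytes buffer from the 2-char chunks and one int.from_bytes call with the endian folded into its byteorder argument.
import Mathlib
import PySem

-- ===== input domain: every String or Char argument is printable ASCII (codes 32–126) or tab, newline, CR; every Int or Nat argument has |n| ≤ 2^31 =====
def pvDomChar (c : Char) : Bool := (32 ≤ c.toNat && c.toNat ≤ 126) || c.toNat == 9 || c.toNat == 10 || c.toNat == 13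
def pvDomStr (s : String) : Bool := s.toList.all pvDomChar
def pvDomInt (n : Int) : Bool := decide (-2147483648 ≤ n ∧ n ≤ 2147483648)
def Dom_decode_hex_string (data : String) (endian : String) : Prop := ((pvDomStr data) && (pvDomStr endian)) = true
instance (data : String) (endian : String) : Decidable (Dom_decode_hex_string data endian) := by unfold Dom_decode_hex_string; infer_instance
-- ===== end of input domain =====

-- B replaces A's bit-shift accumulation (with its per-iteration endian branch) by building the
-- list of chunk bytes and one from_bytes-style fold whose direction encodes the endianness (idiomatic).

-- ===== PORT A =====
-- the while loop of A; returns none exactly where int(data[n:n+2], 16) raises ValueError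
def pvLoopA (cs : List Char) (endian : String) (ret : Int) (n : Nat) (pos : Nat) : Option Int :=
  if _h : n < cs.length then
    match PySem.Int.ofCharsBase? (PySem.List.slice cs (some (n : Int)) (some ((n : Int) + 2))) 16 with
    | none => none
    | some v =>
      let num := PySem.Int.band v 255
      let ret' := if endian == "little" then ret + (num <<< (8 * pos)) else (ret <<< (8:Nat)) + num
      pvLoopA cs endian ret' (n + 2) (pos + 1)
  else some ret
termination_by cs.length - n
decreasing_by omega

def decode_hex_string (data : String) (endian : String) : Int :=
  (pvLoopA data.toList endian 0 0 0).getD 0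

-- ===== PORT B =====
-- the chunk byte at index i : int(data[i:i+2], 16) & 0xFF (default 0 is unreachable under Pre_)
def pvByteAt (cs : List Char) (i : Int) : Int :=
  PySem.Int.band ((PySem.Int.ofCharsBase? (PySem.List.slice cs (some i) (some (i + 2))) 16).getD 0) 255

def decode_hex_string_alt (data : String) (endian : String) : Int :=
  let cs := data.toList
  let buf := (PySem.List.pyRange 0 (cs.length : Int) 2).map (pvByteAt cs)
  -- int.from_bytes: a base-256 fold, over the reversed buffer for little-endian
  let bytes := if endian == "little" then buf.reverse else buf
  bytes.foldl (fun a b => a * 256 + b) 0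

-- ===== PRECONDITION & SPEC =====
-- Pre_ (A's full returning domain): every 2-character chunk starting at an even position parses as base-16 (int(chunk, 16)
-- raises ValueError otherwise, and A propagates that exception).
def Pre_decode_hex_string (data : String) (endian : String) : Prop :=
  ∀ n ∈ List.range data.toList.length, n % 2 = 0 →
    (PySem.Int.ofCharsBase? ((data.toList.drop n).take 2) 16).isSome = true
instance (data : String) (endian : String) : Decidable (Pre_decode_hex_string data endian) := by
  unfold Pre_decode_hex_string; infer_instance

def pvWitness_decode_hex_string : String × String := ("ff01", "little")

def Spec_decode_hex_string (data : String) (endian : String) (out : Int) : Prop := out = decode_hex_string_alt data endian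
instance (data : String) (endian : String) (out : Int) : Decidable (Spec_decode_hex_string data endian out) := by unfold Spec_decode_hex_string; infer_instance

-- ===== CLAIM (what is proved, stated in full; the proofs are below) =====
def Claim_equal_decode_hex_string : Prop := ∀ (data : String) (endian : String), Dom_decode_hex_string data endian → Pre_decode_hex_string data endian → Spec_decode_hex_string data endian (decode_hex_string data endian)

-- ===== LEMMAS AND PROOFS =====

theorem pvRange2_nil (a b : Int) (h : b ≤ a) : PySem.List.pyRange a b 2 = [] := by
  rw [PySem.List.pyRange_of_pos a b (by norm_num)]
  simp [show ¬ a < b by omega]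

theorem pvRange2_cons (a b : Int) (h : a < b) :
    PySem.List.pyRange a b 2 = a :: PySem.List.pyRange (a + 2) b 2 := by
  rw [PySem.List.pyRange_of_pos a b (by norm_num), PySem.List.pyRange_of_pos (a + 2) b (by norm_num)]
  by_cases h2 : a + 2 < b
  · have : ((b - a + 2 - 1) / 2).toNat = ((b - (a + 2) + 2 - 1) / 2).toNat + 1 := by omega
    rw [this, if_pos h, if_pos h2, List.range_succ_eq_map]
    simp [List.map_map, Function.comp]
    intro k _; omega
  · have hb : ((b - a + 2 - 1) / 2).toNat = 1 := by omega
    rw [if_pos h, if_neg h2, hb]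
    simp

theorem pvLoopA_little (cs : List Char) (endian : String)
    (hend : (endian == "little") = true)
    (hPre : ∀ m ∈ List.range cs.length, m % 2 = 0 →
      (PySem.Int.ofCharsBase? ((cs.drop m).take 2) 16).isSome = true) :
    ∀ k n pos ret, cs.length - n ≤ k → n % 2 = 0 →
      pvLoopA cs endian ret n pos =
        some (ret + ((PySem.List.pyRange (n : Int) (cs.length : Int) 2).map (pvByteAt cs)).foldr
          (fun b a => a * 256 + b) 0 * 2 ^ (8 * pos)) := by
  intro k
  induction k with
  | zero =>
    intro n pos ret hk hn
    have hge : cs.length ≤ n := by omega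
    rw [pvLoopA, dif_neg (by omega), pvRange2_nil _ _ (by exact_mod_cast hge)]
    simp
  | succ k ih =>
    intro n pos ret hk hn
    by_cases hlt : n < cs.length
    · have hslice : PySem.List.slice cs (some (n : Int)) (some ((n : Int) + 2)) =
        (cs.drop n).take 2 := by
        exact_mod_cast PySem.List.slice_natCast_add cs n 2
      have hp := hPre n (List.mem_range.mpr hlt) hn
      obtain ⟨v, hv⟩ := Option.isSome_iff_exists.mp hp
      rw [pvLoopA, dif_pos hlt, hslice, hv]
      simp only [hend, if_true]
      rw [ih (n + 2) (pos + 1) _ (by omega) (by omega)]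
      rw [pvRange2_cons (n : Int) (cs.length : Int) (by exact_mod_cast hlt)]
      have hcast : ((n : Int) + 2) = ((n + 2 : Nat) : Int) := by push_cast; ring_nf
      rw [List.map_cons, List.foldr_cons, hcast]
      have hbyte : pvByteAt cs (n : Int) = PySem.Int.band v 255 := by
        simp [pvByteAt, hslice, hv]
      rw [hbyte, Int.shiftLeft_eq]
      have hpow : (2 : Int) ^ (8 * (pos + 1)) = 2 ^ (8 * pos) * 256 := by
        rw [show 8 * (pos + 1) = 8 * pos + 8 by ring, pow_add]; norm_num
      rw [hpow]; ring
    · rw [pvLoopA, dif_neg hlt, pvRange2_nil _ _ (by exact_mod_cast Nat.le_of_not_lt hlt)]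
      simp

theorem pvLoopA_big (cs : List Char) (endian : String)
    (hend : (endian == "little") = false)
    (hPre : ∀ m ∈ List.range cs.length, m % 2 = 0 →
      (PySem.Int.ofCharsBase? ((cs.drop m).take 2) 16).isSome = true) :
    ∀ k n pos ret, cs.length - n ≤ k → n % 2 = 0 →
      pvLoopA cs endian ret n pos =
        some (((PySem.List.pyRange (n : Int) (cs.length : Int) 2).map (pvByteAt cs)).foldl
          (fun a b => a * 256 + b) ret) := by
  intro k
  induction k with
  | zero =>
    intro n pos ret hk hn
    have hge : cs.length ≤ n := by omega
    rw [pvLoopA, dif_neg (by omega), pvRange2_nil _ _ (by exact_mod_cast hge)]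
    simp
  | succ k ih =>
    intro n pos ret hk hn
    by_cases hlt : n < cs.length
    · have hslice : PySem.List.slice cs (some (n : Int)) (some ((n : Int) + 2)) =
        (cs.drop n).take 2 := by
        exact_mod_cast PySem.List.slice_natCast_add cs n 2
      have hp := hPre n (List.mem_range.mpr hlt) hn
      obtain ⟨v, hv⟩ := Option.isSome_iff_exists.mp hp
      rw [pvLoopA, dif_pos hlt, hslice, hv]
      simp only [hend, Bool.false_eq_true, if_false]
      rw [ih (n + 2) (pos + 1) _ (by omega) (by omega)]
      rw [pvRange2_cons (n : Int) (cs.length : Int) (by exact_mod_cast hlt)]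
      have hcast : ((n : Int) + 2) = ((n + 2 : Nat) : Int) := by push_cast; ring_nf
      have hbyte : pvByteAt cs (n : Int) = PySem.Int.band v 255 := by
        simp [pvByteAt, hslice, hv]
      rw [List.map_cons, List.foldl_cons, hcast, hbyte]
      norm_num [Int.shiftLeft_eq]
    · rw [pvLoopA, dif_neg hlt, pvRange2_nil _ _ (by exact_mod_cast Nat.le_of_not_lt hlt)]
      simp

-- ===== VERDICT (by name: the statement is the Claim_ definition above) =====
theorem decode_hex_string_spec : Claim_equal_decode_hex_string := by
  intro data endian _hDom hPre
  unfold Spec_decode_hex_string decode_hex_string decode_hex_string_alt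
  by_cases hend : (endian == "little") = true
  · rw [pvLoopA_little data.toList endian hend hPre data.toList.length 0 0 0 (by omega) (by omega)]
    simp only [hend, if_true, Nat.cast_zero, List.foldl_reverse]
    simp [mul_comm]
  · rw [pvLoopA_big data.toList endian (by simpa using hend) hPre data.toList.length 0 0 0
      (by omega) (by omega)]
    simp [hend]
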